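-- pv_equiv track=rewrite | github.com/m-naeem66622/UOL_Innovation_Olympiad_3.0 | Question_No_3.py | solution
-- ===== SOURCE A (Python) =====
-- def is_zero(n : int, ind : int) -> int:
--     if ((n & (1 << ind)) == 0):
--         return 0
--     else:
--         return 1
--
-- def count( n:int, ind:int) -> int:
--     res = 0
--     while is_zero(n, ind) != 1:
--         ind+=1
--         if (ind == 32):
--             return 0
--         res+=1
--     return res
--
-- def solution(num:int) -> int:
--     result = 0
--     for i in range(32):
--         if is_zero(num, i):
--             t = count(num, i + 1)
--             if result < t:
--                 result = t
--             else:
--                 result = result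
--     return result
-- ===== SOURCE B (Python) =====
-- def solution(num: int) -> int:
--     result = 0
--     last = None
--     for i in range(32):
--         if num & (1 << i):
--             if last is not None:
--                 result = max(result, i - last - 1)
--             last = i
--     return result
-- ===== Notes on version B (the rewrite author's own statement) =====
-- stated objective: simpler
-- what changed: Replaced A's per-set-bit forward re-scan (count) with a single pass over bits 0..31 that remembers the previous set-bit index and takes index differences.
-- outside the precondition, e.g. on solution(2147483648): A does not finish within the time limit, B returns 0
import Mathlib
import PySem

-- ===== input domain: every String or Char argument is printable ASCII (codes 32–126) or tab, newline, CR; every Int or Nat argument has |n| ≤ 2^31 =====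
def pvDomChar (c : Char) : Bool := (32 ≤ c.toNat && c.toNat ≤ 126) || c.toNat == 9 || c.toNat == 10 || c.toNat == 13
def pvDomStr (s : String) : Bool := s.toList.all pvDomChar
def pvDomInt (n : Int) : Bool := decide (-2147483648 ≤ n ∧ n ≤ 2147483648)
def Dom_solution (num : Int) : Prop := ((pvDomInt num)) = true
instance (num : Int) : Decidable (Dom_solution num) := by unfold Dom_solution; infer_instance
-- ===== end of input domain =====

-- B = one forward pass remembering the previous set-bit index (index difference) instead of
-- A's re-scan-forward count after every set bit: simpler single-pass version, same values.

-- ===== PORT A =====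
-- Python `n & (1 << ind)`: `1 << ind` is ported as `(1:Int) <<< ind.toNat`, exact for 0 ≤ ind
-- (every call site here has 0 ≤ ind).
def is_zero (n : Int) (ind : Int) : Int :=
  if PySem.Int.band n ((1:Int) <<< ind.toNat) = 0 then 0 else 1

-- the `while` loop of `count`; fuel 33 exceeds the number of iterations of every call
-- `solution` makes (ind starts ≥ 1 and the loop stops at ind = 32)
def countAux (n : Int) (ind : Int) (res : Int) : Nat → Int
  | 0 => 0
  | fuel+1 =>
    if is_zero n ind = 1 then res
    else if ind + 1 = 32 then 0
    else countAux n (ind + 1) (res + 1) fuel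

def count (n : Int) (ind : Int) : Int := countAux n ind 0 33

def stepA (num : Int) (result : Int) (i : Int) : Int :=
  if is_zero num i ≠ 0 then
    let t := count num (i + 1)
    if result < t then t else result
  else result

def solution (num : Int) : Int :=
  (PySem.List.pyRange 0 32).foldl (stepA num) 0

-- ===== PORT B =====
def stepB (num : Int) (st : Int × Option Int) (i : Int) : Int × Option Int :=
  if PySem.Int.band num ((1:Int) <<< i.toNat) ≠ 0 then
    (match st.2 with
     | some last => (max st.1 (i - last - 1), some i)
     | none => (st.1, some i))
  else st

def solution_alt (num : Int) : Int :=
  ((PySem.List.pyRange 0 32).foldl (stepB num) (0, (none : Option Int))).1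

-- ===== PRECONDITION & SPEC =====
-- Pre_ excludes num = 2^31 (inside Dom only this value), where Python A never returns:
-- count(num, 32) loops forever because ind skips past the `ind == 32` check.
def Pre_solution (num : Int) : Prop := num ≠ 2147483648
instance (num : Int) : Decidable (Pre_solution num) := by unfold Pre_solution; infer_instance
def pvWitness_solution : Int := 5

def Spec_solution (num : Int) (out : Int) : Prop := out = solution_alt num
instance (num : Int) (out : Int) : Decidable (Spec_solution num out) := by unfold Spec_solution; infer_instance

-- ===== CLAIM (what is proved, stated in full; the proofs are below) =====
def Claim_equal_solution : Prop := ∀ (num : Int), Dom_solution num → Pre_solution num → Spec_solution num (solution num)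

-- ===== LEMMAS AND PROOFS =====

-- the two folds over the first n indices
def foldA (num : Int) (n : Nat) : Int :=
  (List.map (fun k : Nat => (k : Int)) (List.range n)).foldl (stepA num) 0
def foldB (num : Int) (n : Nat) : Int × Option Int :=
  (List.map (fun k : Nat => (k : Int)) (List.range n)).foldl (stepB num) (0, (none : Option Int))

lemma iz_cases (n i : Int) : is_zero n i = 0 ∨ is_zero n i = 1 := by
  unfold is_zero; split <;> simp

lemma iz_one_iff (n i : Int) : is_zero n i = 1 ↔ PySem.Int.band n ((1:Int) <<< i.toNat) ≠ 0 := by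
  unfold is_zero; split <;> simp_all

lemma if_lt_max (a b : Int) : (if a < b then b else a) = max a b := by
  split_ifs <;> omega

lemma foldA_succ (num : Int) (n : Nat) :
    foldA num (n + 1) = stepA num (foldA num n) n := by
  simp [foldA, List.range_succ]

lemma foldB_succ (num : Int) (n : Nat) :
    foldB num (n + 1) = stepB num (foldB num n) n := by
  simp [foldB, List.range_succ]

lemma countAux_all_zero (num : Int) : ∀ (fuel : Nat) (ind res : Int), 0 ≤ ind → ind ≤ 31 →
    (32 - ind).toNat < fuel → (∀ k : Int, ind ≤ k → k ≤ 31 → is_zero num k = 0) →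
    countAux num ind res fuel = 0 := by
  intro fuel
  induction fuel with
  | zero => intro ind res _ _ hf _; omega
  | succ f ih =>
    intro ind res h0 h31 hf hall
    have hz : is_zero num ind = 0 := hall ind le_rfl h31
    by_cases h32 : ind + 1 = 32
    · simp [countAux, hz, h32]
    · have : countAux num ind res (f+1) = countAux num (ind+1) (res+1) f := by
        simp [countAux, hz, h32]
      rw [this]
      exact ih (ind+1) (res+1) (by omega) (by omega) (by omega)
        (fun k hk1 hk2 => hall k (by omega) hk2)

lemma countAux_finds (num : Int) : ∀ (fuel : Nat) (ind res i : Int), 0 ≤ ind → ind ≤ i → i ≤ 31 →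
    (32 - ind).toNat < fuel → is_zero num i = 1 → (∀ k : Int, ind ≤ k → k < i → is_zero num k = 0) →
    countAux num ind res fuel = res + (i - ind) := by
  intro fuel
  induction fuel with
  | zero => intro ind res i _ _ _ hf _ _; omega
  | succ f ih =>
    intro ind res i h0 hle h31 hf hi hall
    rcases eq_or_lt_of_le hle with heq | hlt
    · subst heq; simp [countAux, hi]
    · have hz : is_zero num ind = 0 := hall ind le_rfl hlt
      have hz' : ¬ is_zero num ind = 1 := by omega
      have h32 : ¬ ind + 1 = 32 := by omega
      have : countAux num ind res (f+1) = countAux num (ind+1) (res+1) f := by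
        simp [countAux, hz, h32]
      rw [this, ih (ind+1) (res+1) i (by omega) (by omega) h31 (by omega) hi
        (fun k hk1 hk2 => hall k (by omega) hk2)]
      ring

-- within Dom and Pre_, if bit 31 is set then num is negative, so bit 32 is set too
lemma bit32 (num : Int) (hlo : -2147483648 ≤ num) (hhi : num ≤ 2147483648)
    (hne : num ≠ 2147483648) (h31 : is_zero num 31 = 1) : is_zero num 32 = 1 := by
  have e31 : ((1:Int) <<< (31:Int).toNat) = 2147483648 := by decide
  have e32 : ((1:Int) <<< (32:Int).toNat) = 4294967296 := by decide
  by_cases hpos : 0 ≤ num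
  · exfalso
    rw [iz_one_iff, e31] at h31
    have hnum : num.toNat < 2^31 := by omega
    have : PySem.Int.band num 2147483648 = ((num.toNat &&& 2^31 : Nat) : Int) := by
      rw [PySem.Int.band_of_nonneg hpos (by norm_num)]
      congr 1
    rw [this] at h31
    rw [Nat.and_two_pow, Nat.testBit_lt_two_pow hnum] at h31
    simp at h31
  · have hneg : num < 0 := by omega
    rw [iz_one_iff, e32]
    have hm : (-num - 1).toNat < 2^32 := by omega
    have hand : 2^32 &&& (-num - 1).toNat = 0 := by
      rw [Nat.two_pow_and, Nat.testBit_lt_two_pow hm]; simp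
    have : PySem.Int.band num 4294967296 = (((4294967296:Int).toNat - ((4294967296:Int).toNat &&& (-num - 1).toNat) : Nat) : Int) := by
      unfold PySem.Int.band
      rw [if_neg (by omega), if_pos (by norm_num)]
    rw [this]
    have h1 : ((4294967296:Int).toNat : Nat) = 2^32 := by decide
    rw [h1, hand]
    norm_num

-- the joint loop invariant: B's result plus the pending gap from B's `last` equals A's result
lemma iz_zero_iff (n i : Int) : is_zero n i = 0 ↔ PySem.Int.band n ((1:Int) <<< i.toNat) = 0 := by
  unfold is_zero; split <;> simp_all

lemma inv (num : Int) : ∀ n : Nat, n ≤ 32 →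
    0 ≤ (foldB num n).1 ∧
    (((∀ k : Int, 0 ≤ k → k < (n:Int) → is_zero num k = 0) ∧ (foldB num n).2 = none ∧
        foldA num n = (foldB num n).1) ∨
     (∃ j : Int, (foldB num n).2 = some j ∧ 0 ≤ j ∧ j < (n:Int) ∧ is_zero num j = 1 ∧
        (∀ k : Int, j < k → k < (n:Int) → is_zero num k = 0) ∧
        foldA num n = max (foldB num n).1 (count num (j+1)))) := by
  intro n
  induction n with
  | zero =>
    intro _
    exact ⟨le_refl 0, Or.inl ⟨fun k hk1 hk2 => absurd hk2 (by omega), rfl, rfl⟩⟩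
  | succ n ih =>
    intro hn
    obtain ⟨hB0, hcase⟩ := ih (by omega)
    rw [foldA_succ, foldB_succ]
    rcases iz_cases num n with hz | ho
    · -- bit n clear: both states unchanged
      have hband : PySem.Int.band num ((1:Int) <<< n) = 0 := by
        simpa using (iz_zero_iff num n).mp hz
      have hsB : stepB num (foldB num n) (n:Int) = foldB num n := by
        unfold stepB; simp [hband]
      have hsA : stepA num (foldA num n) (n:Int) = foldA num n := by
        unfold stepA; simp [hz]
      rw [hsA, hsB]
      refine ⟨hB0, ?_⟩
      rcases hcase with ⟨hall, hnone, heq⟩ | ⟨j, hj, hj0, hjn, hjset, hgap, heq⟩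
      · exact Or.inl ⟨fun k hk1 hk2 => by
          rcases lt_or_ge k (n:Int) with h | h
          · exact hall k hk1 h
          · have : k = (n:Int) := by push_cast at hk2 ⊢; omega
            exact this ▸ hz, hnone, heq⟩
      · refine Or.inr ⟨j, hj, hj0, by push_cast; omega, hjset, ?_, heq⟩
        intro k hk1 hk2
        rcases lt_or_ge k (n:Int) with h | h
        · exact hgap k hk1 h
        · have : k = (n:Int) := by push_cast at hk2 ⊢; omega
          exact this ▸ hz
    · -- bit n set
      have hband : ¬ PySem.Int.band num ((1:Int) <<< n) = 0 := by
        intro hc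
        have : is_zero num (n:Int) = 0 := (iz_zero_iff num n).mpr (by simpa using hc)
        omega
      have hsA : stepA num (foldA num n) (n:Int) =
          max (foldA num n) (count num ((n:Int)+1)) := by
        unfold stepA
        rw [if_pos (by omega : is_zero num (n:Int) ≠ 0)]
        exact if_lt_max _ _
      rw [hsA]
      rcases hcase with ⟨hall, hnone, heq⟩ | ⟨j, hj, hj0, hjn, hjset, hgap, heq⟩
      · -- no previous set bit
        have hsB : stepB num (foldB num n) (n:Int) = ((foldB num n).1, some (n:Int)) := by
          unfold stepB; simp [hband, hnone]
        rw [hsB]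
        refine ⟨hB0, Or.inr ⟨(n:Int), rfl, by positivity, by push_cast; omega, ho, ?_, by rw [heq]⟩⟩
        intro k hk1 hk2; push_cast at hk1 hk2; omega
      · -- previous set bit j: the pending count equals n - j - 1
        have hcnt : count num (j+1) = (n:Int) - j - 1 := by
          unfold count
          rw [countAux_finds num 33 (j+1) 0 (n:Int) (by omega) (by omega) (by omega)
            (by omega) ho (fun k hk1 hk2 => hgap k (by omega) (by omega))]
          ring
        have hsB : stepB num (foldB num n) (n:Int) =
            (max (foldB num n).1 ((n:Int) - j - 1), some (n:Int)) := by
          unfold stepB; simp [hband, hj]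
        rw [hsB]
        refine ⟨le_trans hB0 (le_max_left _ _), Or.inr ⟨(n:Int), rfl, by positivity, by push_cast; omega, ho, ?_, ?_⟩⟩
        · intro k hk1 hk2; push_cast at hk1 hk2; omega
        · rw [heq, hcnt]

lemma pyRange32 : PySem.List.pyRange 0 32 = List.map (fun k : Nat => (k : Int)) (List.range 32) := by
  have := PySem.List.pyRange_zero_natCast 32
  simpa using this

lemma solution_eq_foldA (num : Int) : solution num = foldA num 32 := by
  unfold solution foldA; rw [pyRange32]

lemma solution_alt_eq_foldB (num : Int) : solution_alt num = (foldB num 32).1 := by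
  unfold solution_alt foldB; rw [pyRange32]

-- ===== VERDICT (by name: the statement is the Claim_ definition above) =====
theorem solution_spec : Claim_equal_solution := by
  intro num hdom hpre
  unfold Spec_solution
  have hdom' : -2147483648 ≤ num ∧ num ≤ 2147483648 := by
    unfold Dom_solution pvDomInt at hdom; exact of_decide_eq_true hdom
  obtain ⟨hB0, hcase⟩ := inv num 32 le_rfl
  rw [solution_eq_foldA, solution_alt_eq_foldB]
  rcases hcase with ⟨_, _, heq⟩ | ⟨j, hj, hj0, hjn, hjset, hgap, heq⟩
  · exact heq
  · have hcnt : count num (j+1) = 0 := by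
      rcases lt_or_ge j 31 with hlt | hge
      · unfold count
        exact countAux_all_zero num 33 (j+1) 0 (by omega) (by omega) (by omega)
          (fun k hk1 hk2 => hgap k (by omega) (by push_cast; omega))
      · have hj31 : j = 31 := by push_cast at hjn; omega
        subst hj31
        have h32 : is_zero num 32 = 1 := bit32 num hdom'.1 hdom'.2 hpre hjset
        unfold count
        simp [countAux, h32]
      -- j = 31: bit 32 is set (Dom + Pre_), so the while loop exits immediately with res = 0
    rw [heq, hcnt]
    omega
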